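-- pv_equiv track=rewrite | github.com/PyLamGR/Logic-Design-Tools | Solvers/BDD/BDD.py | generate_reversals
-- ===== SOURCE A (Python) =====
-- def generate_reversals(string):
--     result = ''
--     snext = ''
--     snow = ''
--     for i in range(len(string)):
--         if i == len(string)-1:
--             snext = string[i]
--             snow = string[i]
--         else:
--             snext = string[i+1]
--             snow = string[i]
--         if ord(snow) == 39:
--             continue
--         elif ord(snext) == 39:
--             result += str(snow).upper()
--         else:
--             result += str(snow)
--         result.replace("'", '')
--     return result
-- ===== SOURCE B (Python) =====
-- def generate_reversals(string):
--     out = []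
--     for c in string:
--         if c == "'":
--             if out:
--                 out[-1] = out[-1].upper()
--         else:
--             out.append(c)
--     return ''.join(out)
-- ===== Notes on version B (the rewrite author's own statement) =====
-- stated objective: simpler
-- what changed: Replaces A's index-based loop with look-ahead at string[i+1] and a last-index special case by a single look-behind pass over the characters that appends to a list and, on an apostrophe, retroactively uppercases the last accumulated char, joining once at the end.
import Mathlib
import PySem

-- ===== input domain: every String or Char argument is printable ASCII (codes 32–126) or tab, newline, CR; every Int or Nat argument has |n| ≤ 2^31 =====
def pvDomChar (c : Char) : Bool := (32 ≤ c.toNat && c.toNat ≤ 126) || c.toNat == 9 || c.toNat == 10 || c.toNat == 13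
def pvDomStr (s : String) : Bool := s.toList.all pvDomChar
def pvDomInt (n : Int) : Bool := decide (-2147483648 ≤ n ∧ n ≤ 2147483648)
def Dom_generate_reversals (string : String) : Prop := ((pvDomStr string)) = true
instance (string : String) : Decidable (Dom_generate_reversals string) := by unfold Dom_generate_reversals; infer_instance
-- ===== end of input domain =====

-- B replaces A's index loop with look-ahead and a last-index special case by one look-behind
-- pass that retroactively uppercases the last accumulated char; objective: simpler.

-- ===== PORT A =====
-- A's `for i in range(len(string))` with string[i] / string[i+1]; the pyGetD default ' ' is
-- unreachable (every index used is in range). `result.replace("'", '')` is a discarded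
-- expression in Python (no-op) and is omitted.
def generate_reversals (string : String) : String :=
  let cs := string.toList
  let n : Int := cs.length
  let result : List Char :=
    (PySem.List.pyRange 0 n 1).foldl (fun result i =>
      let snow : Char :=
        if i = n - 1 then PySem.List.pyGetD cs i ' ' else PySem.List.pyGetD cs i ' '
      let snext : Char :=
        if i = n - 1 then PySem.List.pyGetD cs i ' ' else PySem.List.pyGetD cs (i + 1) ' '
      if snow = '\'' then result
      else if snext = '\'' then result ++ [PySem.Chars.upperChar snow]
      else result ++ [snow]) []
  String.mk result

-- ===== PORT B =====
-- Source B: build `out`; on an apostrophe uppercase out's last element (if any), else append c.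
def generate_reversals_alt (string : String) : String :=
  let out : List Char :=
    string.toList.foldl (fun out c =>
      if c = '\'' then
        if out.isEmpty then out
        else out.dropLast ++ [PySem.Chars.upperChar (out.getLast!)]
      else out ++ [c]) []
  String.mk out

-- ===== PRECONDITION & SPEC =====
def Spec_generate_reversals (string : String) (out : String) : Prop := out = generate_reversals_alt string
instance (string : String) (out : String) : Decidable (Spec_generate_reversals string out) := by unfold Spec_generate_reversals; infer_instance

-- ===== CLAIM (what is proved, stated in full; the proofs are below) =====
def Claim_equal_generate_reversals : Prop := ∀ (string : String), Dom_generate_reversals string → Spec_generate_reversals string (generate_reversals string)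

-- ===== LEMMAS AND PROOFS =====

-- Common characterisation: drop apostrophes; a kept char is uppercased iff the very next
-- char of the input is an apostrophe.
def pvG : List Char → List Char
  | [] => []
  | c :: rest =>
    if c = '\'' then pvG rest
    else (if rest.head? = some '\'' then PySem.Chars.upperChar c else c) :: pvG rest

def pvUpLast (out : List Char) : List Char :=
  if out.isEmpty then out
  else out.dropLast ++ [PySem.Chars.upperChar (out.getLast!)]

theorem pvOfNat_toNat (n : Nat) (h : n < 55296) : (Char.ofNat n).toNat = n := by
  unfold Char.ofNat
  rw [dif_pos (by exact Or.inl (by simpa using h) : Nat.isValidChar n)]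
  simp [Char.toNat, Char.ofNatAux]

theorem pvLe_iff (a b : Char) : a ≤ b ↔ a.toNat ≤ b.toNat := by
  rw [Char.le_def]
  exact UInt32.le_iff_toNat_le

theorem pvUpper_idem (c : Char) : PySem.Chars.upperChar (PySem.Chars.upperChar c) = PySem.Chars.upperChar c := by
  unfold PySem.Chars.upperChar PySem.Chars.islower
  by_cases h : 'a' ≤ c ∧ c ≤ 'z'
  · have h1 : 97 ≤ c.toNat := (pvLe_iff _ _).mp h.1
    have h2 : c.toNat ≤ 122 := (pvLe_iff _ _).mp h.2
    have hd : (Char.ofNat (c.toNat - 32)).toNat = c.toNat - 32 := pvOfNat_toNat _ (by omega)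
    have hne : ¬ ('a' ≤ Char.ofNat (c.toNat - 32)) := by
      rw [pvLe_iff, hd]
      have : 'a'.toNat = 97 := rfl
      omega
    simp [h.1, h.2, hne]
  · have : ¬ (decide ('a' ≤ c) && decide (c ≤ 'z')) = true := by
      simp only [Bool.and_eq_true, decide_eq_true_eq]; tauto
    simp [this]

theorem pvUpLast_append (out : List Char) (c : Char) :
    pvUpLast (out ++ [c]) = out ++ [PySem.Chars.upperChar c] := by
  simp [pvUpLast]

theorem pvUpLast_idem (out : List Char) : pvUpLast (pvUpLast out) = pvUpLast out := by
  rcases List.eq_nil_or_concat out with h | ⟨ys, y, rfl⟩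
  · simp [h, pvUpLast]
  · simp only [List.concat_eq_append]
    rw [pvUpLast_append, pvUpLast_append, pvUpper_idem]

-- B's fold equals pvG, with the pending retro-uppercase made explicit.
theorem pvB_fold (cs : List Char) : ∀ out : List Char,
    cs.foldl (fun out c =>
      if c = '\'' then
        if out.isEmpty then out
        else out.dropLast ++ [PySem.Chars.upperChar (out.getLast!)]
      else out ++ [c]) out
    = (if cs.head? = some '\'' then pvUpLast out else out) ++ pvG cs := by
  induction cs with
  | nil => intro out; simp [pvG]
  | cons c rest ih =>
    intro out
    by_cases hc : c = '\''
    · subst hc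
      simp only [List.foldl_cons]
      have : (if out.isEmpty then out else out.dropLast ++ [PySem.Chars.upperChar (out.getLast!)]) = pvUpLast out := rfl
      rw [this, ih]
      by_cases hr : rest.head? = some '\''
      · simp [hr, pvG, pvUpLast_idem]
      · simp [hr, pvG]
    · simp only [List.foldl_cons, if_neg hc]
      rw [ih]
      by_cases hr : rest.head? = some '\''
      · simp [hr, pvG, hc, pvUpLast_append]
      · simp [hr, pvG, hc]

-- A's indexed fold equals pvG on the remaining suffix.
theorem pvA_fold (cs : List Char) : ∀ (m k : Nat) (acc : List Char), cs.length - k = m →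
    (PySem.List.pyRange k cs.length 1).foldl (fun result i =>
      let snow : Char :=
        if i = (cs.length : Int) - 1 then PySem.List.pyGetD cs i ' ' else PySem.List.pyGetD cs i ' '
      let snext : Char :=
        if i = (cs.length : Int) - 1 then PySem.List.pyGetD cs i ' ' else PySem.List.pyGetD cs (i + 1) ' '
      if snow = '\'' then result
      else if snext = '\'' then result ++ [PySem.Chars.upperChar snow]
      else result ++ [snow]) acc
    = acc ++ pvG (cs.drop k) := by
  intro m
  induction m with
  | zero =>
    intro k acc hk
    have hk' : cs.length ≤ k := by omega
    rw [PySem.List.pyRange_one_eq_nil (by exact_mod_cast hk')]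
    simp [List.drop_eq_nil_of_le hk', pvG]
  | succ m ih =>
    intro k acc hk
    have hklt : k < cs.length := by omega
    rw [PySem.List.pyRange_one_cons (by exact_mod_cast hklt)]
    rw [List.foldl_cons]
    have hcast : ((k : Int) + 1) = ((k + 1 : Nat) : Int) := by push_cast; ring
    have hdrop : cs.drop k = cs[k] :: cs.drop (k + 1) := List.drop_eq_getElem_cons hklt
    have hsnow : PySem.List.pyGetD cs (k : Int) ' ' = cs[k] := by
      rw [PySem.List.pyGetD_natCast]
      exact List.getD_eq_getElem cs ' ' hklt
    have step :
        (if (k : Int) = (cs.length : Int) - 1 then PySem.List.pyGetD cs (k : Int) ' ' else PySem.List.pyGetD cs (k : Int) ' ') = cs[k] := by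
      rw [ite_self, hsnow]
    by_cases hlast : k + 1 = cs.length
    · -- last index: snext = snow
      have hcond : ((k : Int) = (cs.length : Int) - 1) := by omega
      have hhead : (cs.drop (k + 1)).head? = none := by
        simp [List.drop_eq_nil_of_le (by omega : cs.length ≤ k + 1)]
      rw [hcast, ih (k+1) _ (by omega), hdrop]
      simp only [if_pos hcond, hsnow]
      by_cases hq : cs[k] = '\''
      · simp [pvG, hq, hhead]
      · simp [pvG, hq, hhead]
    · -- interior index: snext = cs[k+1]
      have hk1 : k + 1 < cs.length := by omega
      have hcond : ¬ ((k : Int) = (cs.length : Int) - 1) := by omega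
      have hsnext : PySem.List.pyGetD cs ((k : Int) + 1) ' ' = cs[k+1] := by
        rw [hcast, PySem.List.pyGetD_natCast]
        exact List.getD_eq_getElem cs ' ' hk1
      have hhead : (cs.drop (k + 1)).head? = some cs[k+1] := by
        rw [List.head?_drop]
        simp [hk1]
      rw [hcast, ih (k+1) _ (by omega), hdrop]
      simp only [if_neg hcond, hsnow]
      by_cases hq : cs[k] = '\''
      · simp [pvG, hq, hhead, hsnext]
      · by_cases hq2 : cs[k+1] = '\''
        · simp [pvG, hq, hq2, hhead, hsnext]
        · simp [pvG, hq, hq2, hhead, hsnext]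

theorem pvA_eq (s : String) : generate_reversals s = String.mk (pvG s.toList) := by
  have h := pvA_fold s.toList (s.toList.length) 0 [] (by omega)
  simp only [Nat.cast_zero, List.drop_zero] at h
  unfold generate_reversals
  simp only [h, List.nil_append]

theorem pvB_eq (s : String) : generate_reversals_alt s = String.mk (pvG s.toList) := by
  have h := pvB_fold s.toList []
  unfold generate_reversals_alt
  rw [h]
  by_cases h : s.toList.head? = some '\''
  · simp [h, pvUpLast]
  · simp [h]

-- ===== VERDICT (by name: the statement is the Claim_ definition above) =====
theorem generate_reversals_spec : Claim_equal_generate_reversals := by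
  intro s _
  unfold Spec_generate_reversals
  rw [pvA_eq, pvB_eq]
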